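-- pv_equiv track=rewrite | github.com/SZmiycharov/HackerSchool | goats python.py | MaxSumAtCurrentIteration
-- ===== SOURCE A (Python) =====
-- def MaxSumAtCurrentIteration(helper, boat,length):
--     maxPossibleSum = 0;
--
--     for i in range(length-1, -1, -1):
--         if (maxPossibleSum + helper[i] <= boat):
--                 maxPossibleSum += helper[i];
--                 del helper [i]
--
--         if (maxPossibleSum == boat):
--             break
--
--     return maxPossibleSum
-- ===== SOURCE B (Python) =====
-- def MaxSumAtCurrentIteration(helper, boat, length):
--     # Return-value equivalent of A. A also deletes the taken elements from
--     # `helper` in place; B does not mutate its argument.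
--     s = 0
--     for x in reversed(helper[:max(length, 0)]):
--         if s + x <= boat:
--             s += x
--         if s == boat:
--             break
--     return s
-- ===== Notes on version B (the rewrite author's own statement) =====
-- stated objective: faster
-- what changed: B makes one pure pass over the reversed prefix of the list instead of A's indexed downward loop that deletes each taken element with del (an O(n) shift per deletion); B never mutates helper.
import Mathlib
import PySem

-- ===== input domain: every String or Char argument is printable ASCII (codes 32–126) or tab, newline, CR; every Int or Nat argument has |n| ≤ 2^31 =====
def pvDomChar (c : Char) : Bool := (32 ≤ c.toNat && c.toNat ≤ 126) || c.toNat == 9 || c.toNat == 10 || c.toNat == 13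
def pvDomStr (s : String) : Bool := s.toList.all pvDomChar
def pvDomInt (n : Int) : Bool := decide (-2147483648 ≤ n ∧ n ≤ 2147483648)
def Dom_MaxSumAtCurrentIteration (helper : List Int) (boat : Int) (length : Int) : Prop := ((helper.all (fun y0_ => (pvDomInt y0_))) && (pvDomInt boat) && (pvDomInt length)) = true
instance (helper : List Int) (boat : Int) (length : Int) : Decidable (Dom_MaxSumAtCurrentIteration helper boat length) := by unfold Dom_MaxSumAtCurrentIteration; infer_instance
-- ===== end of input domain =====

-- B replaces A's indexed downward loop with `del` by one pure pass over the
-- reversed prefix (objective: faster). A mutates `helper` in place (deletes the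
-- taken elements); B does not — the equivalence proved here is about the RETURN
-- value only.

-- ===== PORT A =====
-- for i in range(length-1, -1, -1): the loop counter is ported as a Nat `i+1`
-- whose current Python index is `i`; helper[i] is PySem.List.pyGetD (in range
-- under Pre_), `del helper[i]` is eraseIdx.
def MaxSumAtCurrentIteration.loopA (boat : Int) : List Int → Nat → Int → Int
  | _, 0, s => s
  | h, i+1, s =>
      let x := PySem.List.pyGetD h (i : Int) 0
      if s + x ≤ boat then
        let s' := s + x
        let h' := h.eraseIdx i
        if s' = boat then s' else MaxSumAtCurrentIteration.loopA boat h' i s'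
      else
        if s = boat then s else MaxSumAtCurrentIteration.loopA boat h i s

def MaxSumAtCurrentIteration (helper : List Int) (boat : Int) (length : Int) : Int :=
  MaxSumAtCurrentIteration.loopA boat helper length.toNat 0

-- ===== PORT B =====
-- for x in reversed(helper[:max(length, 0)]), with early break on s == boat
def MaxSumAtCurrentIterationAlt.loopB (boat : Int) : List Int → Int → Int
  | [], s => s
  | x :: rest, s =>
      let s' := if s + x ≤ boat then s + x else s
      if s' = boat then s' else MaxSumAtCurrentIterationAlt.loopB boat rest s'

def MaxSumAtCurrentIteration_alt (helper : List Int) (boat : Int) (length : Int) : Int :=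
  MaxSumAtCurrentIterationAlt.loopB boat
    (PySem.List.slice helper none (some (max length 0))).reverse 0

-- ===== PRECONDITION & SPEC =====
-- Pre_ excludes exactly the inputs where A raises IndexError (first access helper[length-1] out of range).
def Pre_MaxSumAtCurrentIteration (helper : List Int) (boat : Int) (length : Int) : Prop :=
  length ≤ (helper.length : Int)
instance (helper : List Int) (boat : Int) (length : Int) : Decidable (Pre_MaxSumAtCurrentIteration helper boat length) := by unfold Pre_MaxSumAtCurrentIteration; infer_instance

def pvWitness_MaxSumAtCurrentIteration : List Int × Int × Int := ([1, 2, 4], 3, 3)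

def Spec_MaxSumAtCurrentIteration (helper : List Int) (boat : Int) (length : Int) (out : Int) : Prop := out = MaxSumAtCurrentIteration_alt helper boat length
instance (helper : List Int) (boat : Int) (length : Int) (out : Int) : Decidable (Spec_MaxSumAtCurrentIteration helper boat length out) := by unfold Spec_MaxSumAtCurrentIteration; infer_instance

-- ===== CLAIM (what is proved, stated in full; the proofs are below) =====
def Claim_equal_MaxSumAtCurrentIteration : Prop := ∀ (helper : List Int) (boat : Int) (length : Int), Dom_MaxSumAtCurrentIteration helper boat length → Pre_MaxSumAtCurrentIteration helper boat length → Spec_MaxSumAtCurrentIteration helper boat length (MaxSumAtCurrentIteration helper boat length)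


-- ===== LEMMAS AND PROOFS =====

-- Invariant: A's loop over indices i-1 … 0 (with the list being mutated at or
-- above the current index only) computes the same value as B's pure fold over
-- the reversed i-prefix of the current list.
lemma loopA_eq_loopB (boat : Int) : ∀ (i : Nat) (h : List Int) (s : Int), i ≤ h.length →
    MaxSumAtCurrentIteration.loopA boat h i s
      = MaxSumAtCurrentIterationAlt.loopB boat ((h.take i).reverse) s := by
  intro i
  induction i with
  | zero => intro h s _; simp [MaxSumAtCurrentIteration.loopA, MaxSumAtCurrentIterationAlt.loopB]
  | succ i ih =>
    intro h s hle
    have hi : i < h.length := by omega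
    have hx : PySem.List.pyGetD h (i : Int) 0 = h[i] := by
      rw [PySem.List.pyGetD_natCast]; exact List.getD_eq_getElem h 0 hi
    have htake : (h.take (i+1)).reverse = h[i] :: (h.take i).reverse := by
      rw [List.take_add_one]
      simp [List.getElem?_eq_getElem hi]
    have herase : (h.eraseIdx i).take i = h.take i := by
      rw [List.eraseIdx_eq_take_drop_succ, List.take_append]
      simp [List.length_take, Nat.min_eq_left (le_of_lt hi)]
    rw [MaxSumAtCurrentIteration.loopA, htake, MaxSumAtCurrentIterationAlt.loopB]
    simp only [hx]
    by_cases hc : s + h[i] ≤ boat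
    · simp only [if_pos hc]
      by_cases hb : s + h[i] = boat
      · simp [hb]
      · simp only [if_neg hb]
        rw [ih (h.eraseIdx i) (s + h[i]) (by rw [List.length_eraseIdx_of_lt hi]; omega), herase]
    · simp only [if_neg hc]
      by_cases hb : s = boat
      · simp [hb]
      · simp only [if_neg hb]
        exact ih h s (le_of_lt hi)

-- ===== VERDICT (by name: the statement is the Claim_ definition above) =====
theorem MaxSumAtCurrentIteration_spec : Claim_equal_MaxSumAtCurrentIteration := by
  intro helper boat length _ hpre
  unfold Spec_MaxSumAtCurrentIteration MaxSumAtCurrentIteration MaxSumAtCurrentIteration_alt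
  have h0 : (0 : Int) ≤ max length 0 := le_max_right _ _
  rw [PySem.List.slice_to helper h0]
  have htn : (max length 0).toNat = length.toNat := by omega
  rw [htn]
  exact loopA_eq_loopB boat length.toNat helper 0
    (by unfold Pre_MaxSumAtCurrentIteration at hpre; omega)
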